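-- pv_equiv track=rewrite | github.com/edxu96/TidySimStat | src/TidySimStat/inference.py | get_li_ups
-- ===== SOURCE A (Python) =====
-- def get_li_ups(li):
--     """Analyze number of ups for Knuth Runs test.
--
--     Return
--     ======
--     ups: list of number of ups, whose length is number of runs
--     """
--     ups = {}
--     x = li[0]
--     len_run = 1
--     num_runs = 1
--     for i in li[1: len(li)]:
--         if i > x:
--             len_run += 1
--         else:  # not up, so store the old run, and begin a new run
--             ups[num_runs] = len_run
--             num_runs += 1
--             len_run = 1
--         x = i
--
--     ## add the last run
--     ups[num_runs] = len_run
--     num_runs += 1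
--     len_run = 1
--
--     ups = list(ups.values())
--     return ups
-- ===== SOURCE B (Python) =====
-- def get_li_ups(li):
--     """Run lengths of ascending runs: boundary indices, then successive differences."""
--     n = len(li)
--     bounds = [0] + [k + 1 for k, (a, b) in enumerate(zip(li, li[1:])) if b <= a] + [n]
--     return [j - i for i, j in zip(bounds, bounds[1:])]
-- ===== Notes on version B (the rewrite author's own statement) =====
-- stated objective: alternative
-- what changed: B replaces A's stateful single pass (dict keyed by run number plus len_run/num_runs counters) by computing the list of run-boundary indices from adjacent pairs and returning its successive differences.
import Mathlib
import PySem

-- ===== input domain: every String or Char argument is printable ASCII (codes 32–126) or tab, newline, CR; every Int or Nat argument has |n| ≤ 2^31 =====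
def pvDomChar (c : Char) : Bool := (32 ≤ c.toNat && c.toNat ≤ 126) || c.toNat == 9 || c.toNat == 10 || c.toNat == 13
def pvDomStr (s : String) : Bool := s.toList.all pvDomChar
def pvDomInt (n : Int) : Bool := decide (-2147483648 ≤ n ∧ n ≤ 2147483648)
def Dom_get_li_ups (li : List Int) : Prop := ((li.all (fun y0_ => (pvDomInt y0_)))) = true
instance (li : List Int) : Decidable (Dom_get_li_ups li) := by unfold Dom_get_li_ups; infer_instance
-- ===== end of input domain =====

-- B computes run boundaries (indices where the sequence fails to go up) and returns their
-- successive differences; same values as A's dict-building single pass (objective: alternative).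

-- ===== PORT A =====
-- one loop step of A: state is (ups, x, len_run, num_runs)
def pvStepA (st : PySem.Dict Int Int × Int × Int × Int) (i : Int) :
    PySem.Dict Int Int × Int × Int × Int :=
  let (ups, x, len_run, num_runs) := st
  if i > x then (ups, i, len_run + 1, num_runs)
  else (ups.insert num_runs len_run, i, 1, num_runs + 1)

def get_li_ups (li : List Int) : List Int :=
  match PySem.List.pyGet? li 0 with           -- x = li[0]  (raises IndexError on [])
  | none => []
  | some x0 =>
    let s := (PySem.List.slice li (some 1) (some (li.length : Int))).foldl pvStepA
      (PySem.Dict.empty, x0, 1, 1)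
    let ups := s.1.insert s.2.2.2 s.2.2.1     -- ups[num_runs] = len_run
    ups.values

-- ===== PORT B =====
def get_li_ups_alt (li : List Int) : List Int :=
  let n : Int := li.length
  let bounds : List Int :=
    0 :: (((PySem.List.enumerate (li.zip li.tail) 0).filter
            (fun p => p.2.2 ≤ p.2.1)).map (fun p => p.1 + 1)) ++ [n]
  (bounds.zip bounds.tail).map (fun p => p.2 - p.1)

-- ===== PRECONDITION & SPEC =====
-- Pre_ excludes only the empty list, on which A raises IndexError (li[0]).
def Pre_get_li_ups (li : List Int) : Prop := li ≠ []
instance (li : List Int) : Decidable (Pre_get_li_ups li) := by unfold Pre_get_li_ups; infer_instance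
def pvWitness_get_li_ups : List Int := [3, 1, 2]

def Spec_get_li_ups (li : List Int) (out : List Int) : Prop := out = get_li_ups_alt li
instance (li : List Int) (out : List Int) : Decidable (Spec_get_li_ups li out) := by unfold Spec_get_li_ups; infer_instance

-- ===== CLAIM (what is proved, stated in full; the proofs are below) =====
def Claim_equal_get_li_ups : Prop := ∀ (li : List Int), Dom_get_li_ups li → Pre_get_li_ups li → Spec_get_li_ups li (get_li_ups li)

-- ===== LEMMAS AND PROOFS =====

-- reference description of the result: run lengths given previous element x and current run length
def pvRef (x len : Int) : List Int → List Int
  | [] => [len]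
  | i :: t => if i > x then pvRef i (len + 1) t else len :: pvRef i 1 t

-- boundary indices produced by B's filter, previous element x sitting at index p
def pvCuts (p x : Int) : List Int → List Int
  | [] => []
  | i :: t => if i > x then pvCuts (p + 1) i t else (p + 1) :: pvCuts (p + 1) i t

-- successive differences
def pvDiffs : List Int → List Int
  | a :: b :: l => (b - a) :: pvDiffs (b :: l)
  | _ => []

theorem pvDiffs_eq (l : List Int) :
    (l.zip l.tail).map (fun p => p.2 - p.1) = pvDiffs l := by
  match l with
  | [] => rfl
  | [a] => rfl
  | a :: b :: t =>
    simp only [List.tail_cons, List.zip_cons_cons, List.map_cons, pvDiffs]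
    exact congrArg _ (pvDiffs_eq (b :: t))

theorem pvCuts_eq (rest : List Int) : ∀ (x k : Int),
    ((PySem.List.enumerate ((x :: rest).zip rest) k).filter
      (fun p => p.2.2 ≤ p.2.1)).map (fun p => p.1 + 1) = pvCuts k x rest := by
  induction rest with
  | nil => intro x k; rfl
  | cons i t ih =>
    intro x k
    simp only [List.zip_cons_cons, PySem.List.enumerate_cons, List.filter_cons, pvCuts]
    by_cases h : i > x
    · rw [if_neg (by simpa using h), if_pos h, ih i (k + 1)]
    · rw [if_pos (by simpa using not_lt.mp h), if_neg h]
      simp only [List.map_cons, ih i (k + 1)]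

theorem pvDiffs_cuts (rest : List Int) : ∀ (x s p : Int),
    pvDiffs (s :: (pvCuts p x rest ++ [p + 1 + (rest.length : Int)])) =
      pvRef x (p + 1 - s) rest := by
  induction rest with
  | nil => intro x s p; simp [pvCuts, pvDiffs, pvRef]
  | cons i t ih =>
    intro x s p
    simp only [pvCuts, pvRef, List.length_cons]
    have hl : ((t.length + 1 : Nat) : Int) = (t.length : Int) + 1 := by push_cast; ring
    by_cases h : i > x
    · rw [if_pos h, if_pos h,
        show (p : Int) + 1 + ((t.length + 1 : Nat) : Int) = (p + 1) + 1 + (t.length : Int) by omega,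
        ih i s (p + 1), show (p : Int) + 1 + 1 - s = (p + 1 - s) + 1 by ring]
    · rw [if_neg h, if_neg h]
      simp only [List.cons_append, pvDiffs]
      rw [show (p : Int) + 1 + ((t.length + 1 : Nat) : Int) = (p + 1) + 1 + (t.length : Int) by omega,
        ih i (p + 1) (p + 1), show (p : Int) + 1 + 1 - (p + 1) = 1 by ring]

theorem get_li_ups_alt_cons (x : Int) (rest : List Int) :
    get_li_ups_alt (x :: rest) = pvRef x 1 rest := by
  unfold get_li_ups_alt
  simp only [List.tail_cons, List.length_cons, pvCuts_eq, pvDiffs_eq]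
  rw [show (((rest.length + 1 : Nat)) : Int) = 0 + 1 + (rest.length : Int) by omega]
  simpa using pvDiffs_cuts rest x 0 0

theorem pv_values_insert_fresh (d : PySem.Dict Int Int) (k v : Int)
    (h : d.contains k = false) : (d.insert k v).values = d.values ++ [v] := by
  simp only [PySem.Dict.values, PySem.Dict.items_insert_of_not_contains d v h, List.map_append,
    List.map_cons, List.map_nil]

theorem pv_not_contains_of_lt (d : PySem.Dict Int Int) (nr : Int)
    (hk : ∀ k ∈ d.keys, k < nr) : d.contains nr = false := by
  by_contra hc
  have hmem : nr ∈ d.keys := (PySem.Dict.contains_iff_mem_keys d nr).mp (by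
    cases hcv : d.contains nr with
    | false => exact absurd hcv hc
    | true => rfl)
  exact absurd (hk nr hmem) (lt_irrefl nr)

theorem get_li_ups_fold (rest : List Int) : ∀ (d : PySem.Dict Int Int) (x len nr : Int),
    (∀ k ∈ d.keys, k < nr) →
    ((rest.foldl pvStepA (d, x, len, nr)).1.insert
      (rest.foldl pvStepA (d, x, len, nr)).2.2.2
      (rest.foldl pvStepA (d, x, len, nr)).2.2.1).values = d.values ++ pvRef x len rest := by
  induction rest with
  | nil =>
    intro d x len nr hk
    simp only [List.foldl_nil, pvRef]
    exact pv_values_insert_fresh d nr len (pv_not_contains_of_lt d nr hk)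
  | cons i t ih =>
    intro d x len nr hk
    simp only [List.foldl_cons, pvStepA, pvRef]
    by_cases h : i > x
    · rw [if_pos h, if_pos h]
      exact ih d i (len + 1) nr hk
    · rw [if_neg h, if_neg h]
      have hk' : ∀ k ∈ (d.insert nr len).keys, k < nr + 1 := by
        intro k hkm
        rcases (PySem.Dict.mem_keys_insert d nr k len).mp hkm with rfl | hkd
        · omega
        · exact lt_trans (hk k hkd) (by omega)
      rw [ih (d.insert nr len) i 1 (nr + 1) hk',
        pv_values_insert_fresh d nr len (pv_not_contains_of_lt d nr hk),
        List.append_assoc, List.singleton_append]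

theorem get_li_ups_cons (x : Int) (rest : List Int) :
    get_li_ups (x :: rest) = pvRef x 1 rest := by
  unfold get_li_ups
  have hget : PySem.List.pyGet? (x :: rest) 0 = some x := by
    simp [PySem.List.pyGet?, PySem.List.pyIdx?]
  rw [hget]
  have hslice : PySem.List.slice (x :: rest) (some 1) (some (((x :: rest).length : Nat) : Int))
      = rest := by
    rw [PySem.List.slice_toNat (a := 1) (b := (((x :: rest).length : Nat) : Int)) (xs := x :: rest) (by norm_num) (by positivity)]
    simp
  simp only [hslice]
  have := get_li_ups_fold rest PySem.Dict.empty x 1 1 (by simp [PySem.Dict.keys_empty])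
  simpa [PySem.Dict.values] using this

-- ===== VERDICT (by name: the statement is the Claim_ definition above) =====
theorem get_li_ups_spec : Claim_equal_get_li_ups := by
  intro li _ hpre
  match li with
  | [] => exact absurd rfl hpre
  | x :: rest =>
    unfold Spec_get_li_ups
    rw [get_li_ups_cons, get_li_ups_alt_cons]
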